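-- pv_equiv track=rewrite | github.com/danielsofran/UBB | A1/Semestrul 1/FP/Lab/lab2/Pb13/Pb13/Pb13.py | getnr
-- ===== SOURCE A (Python) =====
-- def prim(n):
--     for i in range(2, n//2+1):
--         if(n%i==0): return False
--     return True
--
-- def divizori(n):
--     d = 2
--     l = []
--     while n>1:
--         p = 0
--         while n%d==0:
--             n = n//d
--             p = p+1
--         if p!=0:
--             for i in range(d): l.append(d)
--         d = d + 1
--         if(d*d>n): d = n
--     return l
--
-- def getnr(count):
--     n = 0 # index N
--     current = 0
--
--     while count>0:
--         n = n+1
--         if prim(n):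
--             count = count-1
--             current = n
--         else:
--             l = divizori(n)
--             if(len(l)<count):
--                 count = count-len(l) # am pus divizorii in sir
--             else:
--                 current = l[count-1]
--                 count = -1
--     return current
-- ===== SOURCE B (Python) =====
-- def _isprime(n):
--     d = 2
--     while d * d <= n:
--         if n % d == 0:
--             return False
--         d += 1
--     return True
--
-- def _sopf(n):
--     # sum of the distinct prime factors of n (= length of A's per-n block)
--     s = 0
--     d = 2
--     while d * d <= n:
--         if n % d == 0:
--             while n % d == 0:
--                 n //= d
--             s += d
--         d += 1
--     if n > 1:
--         s += n
--     return s
--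
-- def _nth_factor(n, r):
--     # r-th (1-based) element of the block "p copies of p for each distinct prime p of n"
--     d = 2
--     while d * d <= n:
--         if n % d == 0:
--             while n % d == 0:
--                 n //= d
--             if r <= d:
--                 return d
--             r -= d
--         d += 1
--     return n
--
-- def getnr(count):
--     if count <= 0:
--         return 0
--     r = count
--     n = 0
--     while True:
--         n += 1
--         ln = 1 if _isprime(n) else _sopf(n)
--         if r <= ln:
--             break
--         r -= ln
--     return n if _isprime(n) else _nth_factor(n, r)
-- ===== Notes on version B (the rewrite author's own statement) =====
-- stated objective: faster
-- what changed: B drops A's list machinery entirely: A materialises each n's block as a list (divizori builds p copies of p per distinct prime factor, prim scans divisors up to n//2) and does length/index bookkeeping on it; B never builds a list - it computes each block's length arithmetically as the sum of distinct prime factors via sqrt-bounded trial division, skips whole blocks by subtracting that sum, and extracts the answer by a direct factor walk.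
import Mathlib
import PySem

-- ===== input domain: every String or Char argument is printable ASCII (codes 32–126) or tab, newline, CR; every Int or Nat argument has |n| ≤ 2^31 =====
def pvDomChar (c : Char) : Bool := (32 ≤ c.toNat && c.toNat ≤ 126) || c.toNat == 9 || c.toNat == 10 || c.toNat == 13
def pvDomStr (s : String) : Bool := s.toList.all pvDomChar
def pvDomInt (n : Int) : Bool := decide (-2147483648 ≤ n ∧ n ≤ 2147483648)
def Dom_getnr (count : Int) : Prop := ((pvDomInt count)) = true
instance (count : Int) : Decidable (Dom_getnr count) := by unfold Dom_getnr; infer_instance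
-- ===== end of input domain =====

-- B replaces A's list machinery entirely: instead of materialising each n's block (the list of
-- p copies of p per distinct prime p) and measuring/indexing it, B computes block lengths
-- arithmetically as the sum of distinct prime factors via sqrt-bounded trial division and
-- extracts the answer by a factor walk; no list is ever built (objective: faster).

-- ===== PORT A =====
-- helper prim(n): for i in range(2, n//2+1): if n%i==0: return False; return True
def primLoop : List Int → Int → Bool
  | [], _ => true
  | i :: rest, n => if PySem.Int.mod n i = 0 then false else primLoop rest n

def prim (n : Int) : Bool :=
  primLoop (PySem.List.pyRange 2 (PySem.Int.floordiv n 2 + 1) 1) n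

-- small arithmetic lemmas the termination arguments of both ports cite by name
theorem dec_toNat (a b : Int) (h0 : 0 ≤ b) (hlt : b < a) : b.toNat < a.toNat :=
  (Int.toNat_lt_toNat (lt_of_le_of_lt h0 hlt)).mpr hlt

theorem one_le_of_pos (a : Int) (h : 0 < a) : 1 ≤ a := by
  rwa [Int.lt_iff_add_one_le, zero_add] at h

theorem mod_zero_iff (m i : Int) (hi : 0 < i) : PySem.Int.mod m i = 0 ↔ i ∣ m := by
  rw [PySem.Int.mod_eq_emod_of_pos hi]
  exact ⟨Int.dvd_of_emod_eq_zero, Int.emod_eq_zero_of_dvd⟩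

theorem divOut_dec (n d : Int) (h : 2 ≤ d ∧ PySem.Int.mod n d = 0 ∧ 1 ≤ n) :
    (PySem.Int.floordiv n d).toNat < n.toNat := by
  rw [PySem.Int.floordiv_eq_ediv_of_pos (lt_of_lt_of_le zero_lt_two h.1)]
  exact dec_toNat n (n / d)
    (Int.ediv_nonneg (le_trans zero_le_one h.2.2) (le_trans zero_le_two h.1))
    (Int.ediv_lt_self_of_pos_of_ne_one (lt_of_lt_of_le zero_lt_one h.2.2)
      (ne_of_gt (lt_of_lt_of_le one_lt_two h.1)))

-- helper: the inner 'while n%d==0: n//=d; p+=1' of divizori.  The conjuncts '2 ≤ d' and '1 ≤ n' of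
-- the guard are a totality guard only: they hold at every call reachable from divizori's loop,
-- where the Python guard is exactly 'n % d == 0'.
def divOut (n d p : Int) : Int × Int :=
  if h : 2 ≤ d ∧ PySem.Int.mod n d = 0 ∧ 1 ≤ n then
    divOut (PySem.Int.floordiv n d) d (p + 1)
  else (n, p)
termination_by n.toNat
decreasing_by
  · exact divOut_dec n d h

theorem divOut_le (d n p : Int) : 0 ≤ n → 2 ≤ d → (divOut n d p).1 ≤ n := by
  induction n, p using divOut.induct d with
  | case1 n p h ih =>
    intro hn hd
    rw [divOut, dif_pos h]
    have hd0 : (0:Int) < d := lt_of_lt_of_le zero_lt_two hd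
    have hfe : PySem.Int.floordiv n d = n / d := PySem.Int.floordiv_eq_ediv_of_pos hd0
    have hq0 : 0 ≤ PySem.Int.floordiv n d := by
      rw [hfe]
      exact Int.ediv_nonneg hn (le_of_lt hd0)
    exact le_trans (ih hq0 hd) (by rw [hfe]; exact Int.ediv_le_self d hn)
  | case2 n p h =>
    intro _ _
    rw [divOut, dif_neg h]

theorem divOut_pos (d n p : Int) : 1 ≤ n → 2 ≤ d → 1 ≤ (divOut n d p).1 := by
  induction n, p using divOut.induct d with
  | case1 n p h ih =>
    intro hn hd
    rw [divOut, dif_pos h]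
    have hd0 : (0:Int) < d := lt_of_lt_of_le zero_lt_two hd
    have hdvd : d ∣ n := (mod_zero_iff n d hd0).mp h.2.1
    have hdn : d ≤ n := Int.le_of_dvd (lt_of_lt_of_le zero_lt_one hn) hdvd
    have hq1 : 1 ≤ PySem.Int.floordiv n d := by
      rw [PySem.Int.floordiv_eq_ediv_of_pos hd0]
      exact (Int.le_ediv_iff_mul_le hd0).mpr (by rwa [one_mul])
    exact ih hq1 hd
  | case2 n p h =>
    intro hn _
    rw [divOut, dif_neg h]
    exact hn

theorem divOut_lt_or_eq (d n p : Int) :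
    1 ≤ n → 2 ≤ d →
    (divOut n d p).1 < n ∨ ((divOut n d p).1 = n ∧ PySem.Int.mod n d ≠ 0) := by
  induction n, p using divOut.induct d with
  | case1 n p h ih =>
    intro hn hd
    rw [divOut, dif_pos h]
    have hd0 : (0:Int) < d := lt_of_lt_of_le zero_lt_two hd
    have hfe : PySem.Int.floordiv n d = n / d := PySem.Int.floordiv_eq_ediv_of_pos hd0
    have hq0 : 0 ≤ PySem.Int.floordiv n d := by
      rw [hfe]
      exact Int.ediv_nonneg (le_trans zero_le_one hn) (le_of_lt hd0)
    refine Or.inl (lt_of_le_of_lt (divOut_le d (PySem.Int.floordiv n d) (p + 1) hq0 hd) ?_)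
    rw [hfe]
    exact Int.ediv_lt_self_of_pos_of_ne_one (lt_of_lt_of_le zero_lt_one hn)
      (ne_of_gt (lt_of_lt_of_le one_lt_two hd))
  | case2 n p h =>
    intro hn hd
    rw [divOut, dif_neg h]
    exact Or.inr ⟨rfl, fun hm => h ⟨hd, hm, hn⟩⟩

-- helper divizori(n): the outer while-loop; state (n, d, l).  The conjuncts '2 ≤ d ∧ d ≤ n' of the
-- guard are a totality guard only: they are an invariant of the loop (established by d = 2 at entry
-- and preserved below), so on every reachable state the guard is Python's 'n > 1'.
theorem divLoop_dec (n d : Int) (h : 1 < n ∧ 2 ≤ d ∧ d ≤ n) :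
    Prod.Lex (· < ·) (· < ·)
      ((divOut n d 0).1.toNat,
        ((divOut n d 0).1 -
          if (d + 1) * (d + 1) > (divOut n d 0).1 then (divOut n d 0).1 else d + 1).toNat)
      (n.toNat, (n - d).toNat) := by
  obtain ⟨hn1, hd2, hdn⟩ := h
  have hn0 : 1 ≤ n := le_of_lt hn1
  rcases divOut_lt_or_eq d n 0 hn0 hd2 with hlt | ⟨heq, hmod⟩
  · exact Prod.Lex.left _ _
      (dec_toNat n _ (le_trans zero_le_one (divOut_pos d n 0 hn0 hd2)) hlt)
  · have hdln : d < n := lt_of_le_of_ne hdn (fun he => hmod (by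
      rw [he, PySem.Int.mod_eq_emod_of_pos (lt_trans zero_lt_one hn1)]
      exact Int.emod_self))
    rw [heq]
    split_ifs with hgt
    · refine Prod.Lex.right _ ?_
      rw [sub_self]
      exact dec_toNat (n - d) 0 le_rfl (sub_pos.mpr hdln)
    · refine Prod.Lex.right _ ?_
      have hd10 : (0:Int) ≤ d + 1 := le_trans zero_le_two (le_trans hd2 (le_of_lt (lt_add_one d)))
      have hd11 : (1:Int) ≤ d + 1 := le_trans one_le_two (le_trans hd2 (le_of_lt (lt_add_one d)))
      have hd1n : d + 1 ≤ n := le_trans (le_mul_of_one_le_left hd10 hd11) (not_lt.mp hgt)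
      exact dec_toNat (n - d) (n - (d + 1)) (sub_nonneg.mpr hd1n)
        (sub_lt_sub_left (lt_add_one d) n)

def divLoop (n d : Int) (l : List Int) : List Int :=
  if h : 1 < n ∧ 2 ≤ d ∧ d ≤ n then
    divLoop (divOut n d 0).1
      (if _hgt : (d + 1) * (d + 1) > (divOut n d 0).1 then (divOut n d 0).1 else d + 1)
      (if _hp : (divOut n d 0).2 ≠ 0 then l ++ (PySem.List.pyRange 0 d 1).map (fun _ => d) else l)
  else l
termination_by (n.toNat, (n - d).toNat)
decreasing_by
  · exact divLoop_dec n d h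

def divizori (n : Int) : List Int := divLoop n 2 []

-- termination lemmas of A's main loop
theorem succ_nonneg_int (n : Int) (hn : 0 ≤ n) : 0 ≤ n + 1 :=
  le_trans hn (le_of_lt (lt_add_one n))

theorem dec_sub_one (count : Int) (hc : count > 0) : (count - 1).toNat < count.toNat :=
  dec_toNat count (count - 1) (sub_nonneg.mpr (one_le_of_pos count hc)) (sub_one_lt count)

theorem dec_sub_len (count n : Int)
    (hl : ((divizori (n + 1)).length : Int) < count ∧ 1 ≤ ((divizori (n + 1)).length : Int)) :
    (count - ((divizori (n + 1)).length : Int)).toNat < count.toNat :=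
  dec_toNat count _ (sub_nonneg.mpr (le_of_lt hl.1))
    (sub_lt_self count (lt_of_lt_of_le zero_lt_one hl.2))

theorem dec_neg_one (count : Int) (hc : count > 0) : (-1 : Int).toNat < count.toNat := by
  have h1 : ((-1 : Int)).toNat = ((0 : Int)).toNat := rfl
  rw [h1]
  exact dec_toNat count 0 le_rfl hc

-- the main loop of A's getnr; 'current' and the fresh l per iteration exactly as in the Python.
-- The conjunct '1 ≤ len(l)' of the middle guard is a totality guard only: divizori of a non-prime
-- n ≥ 4 is never empty (proved in divizori_len_eq_sopf / sopf_pos below), so on every reachable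
-- call the guard is Python's 'len(l) < count'.
def loopA (count current n : Int) (hn : 0 ≤ n) : Int :=
  if hc : count > 0 then
    if hp : prim (n + 1) = true then
      loopA (count - 1) (n + 1) (n + 1) (succ_nonneg_int n hn)
    else
      if hl : (((divizori (n + 1)).length : Int)) < count ∧
          1 ≤ (((divizori (n + 1)).length : Int)) then
        loopA (count - (divizori (n + 1)).length) current (n + 1) (succ_nonneg_int n hn)
      else
        loopA (-1) ((PySem.List.pyGet? (divizori (n + 1)) (count - 1)).getD 0) (n + 1)
          (succ_nonneg_int n hn)
  else current
termination_by count.toNat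
decreasing_by
  · exact dec_sub_one count hc
  · exact dec_sub_len count n hl
  · exact dec_neg_one count hc

def getnr (count : Int) : Int := loopA count 0 0 le_rfl

-- ===== PORT B =====
-- shared termination lemma of the sqrt-bounded trial-division loops
theorem sq_step_dec (n d : Int) (h2 : 2 ≤ d) (hsq : d * d ≤ n) :
    (n - (d + 1)).toNat < (n - d).toNat := by
  have h2d : 2 * d ≤ d * d := mul_le_mul_of_nonneg_right h2 (le_trans zero_le_two h2)
  have ha : d + 1 ≤ d + d := add_le_add le_rfl (le_trans one_le_two h2)
  have hb : d + d ≤ n := by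
    rw [← two_mul]
    exact le_trans h2d hsq
  exact dec_toNat (n - d) (n - (d + 1)) (sub_nonneg.mpr (le_trans ha hb))
    (sub_lt_sub_left (lt_add_one d) n)

-- _isprime(n): while d*d<=n: if n%d==0: return False; d+=1; return True.
-- '2 ≤ d' in the guard is a totality guard only (d starts at 2 and only grows).
def isprimeLoop (n d : Int) : Bool :=
  if h : 2 ≤ d ∧ d * d ≤ n then
    if PySem.Int.mod n d = 0 then false else isprimeLoop n (d + 1)
  else true
termination_by (n - d).toNat
decreasing_by
  · exact sq_step_dec n d h.1 h.2

def isprimeB (n : Int) : Bool := isprimeLoop n 2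

-- the inner 'while n % d == 0: n //= d' of _sopf/_nth_factor; totality guards as in divOut
def divOutB (m d : Int) : Int :=
  if h : 2 ≤ d ∧ PySem.Int.mod m d = 0 ∧ 1 ≤ m then divOutB (PySem.Int.floordiv m d) d
  else m
termination_by m.toNat
decreasing_by
  · exact divOut_dec m d h

theorem divOutB_le (m d : Int) : 0 ≤ m → 2 ≤ d → divOutB m d ≤ m := by
  induction m using divOutB.induct d with
  | case1 m h ih =>
    intro hm hd
    rw [divOutB, dif_pos h]
    have hd0 : (0:Int) < d := lt_of_lt_of_le zero_lt_two hd
    have hfe : PySem.Int.floordiv m d = m / d := PySem.Int.floordiv_eq_ediv_of_pos hd0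
    have hq0 : 0 ≤ PySem.Int.floordiv m d := by
      rw [hfe]
      exact Int.ediv_nonneg hm (le_of_lt hd0)
    exact le_trans (ih hq0 hd) (by rw [hfe]; exact Int.ediv_le_self d hm)
  | case2 m h =>
    intro _ _
    rw [divOutB, dif_neg h]

theorem divOutB_nonneg (m d : Int) : 0 ≤ m → 2 ≤ d → 0 ≤ divOutB m d := by
  induction m using divOutB.induct d with
  | case1 m h ih =>
    intro hm hd
    rw [divOutB, dif_pos h]
    refine ih ?_ hd
    rw [PySem.Int.floordiv_eq_ediv_of_pos (lt_of_lt_of_le zero_lt_two hd)]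
    exact Int.ediv_nonneg hm (le_trans zero_le_two hd)
  | case2 m h =>
    intro hm _
    rw [divOutB, dif_neg h]
    exact hm

theorem divOutB_lt (m d : Int) (hd : 2 ≤ d) (hm : 1 ≤ m) (h0 : PySem.Int.mod m d = 0) :
    divOutB m d < m := by
  rw [divOutB, dif_pos ⟨hd, h0, hm⟩]
  have hd0 : (0:Int) < d := lt_of_lt_of_le zero_lt_two hd
  have hfe : PySem.Int.floordiv m d = m / d := PySem.Int.floordiv_eq_ediv_of_pos hd0
  have hq0 : 0 ≤ PySem.Int.floordiv m d := by
    rw [hfe]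
    exact Int.ediv_nonneg (le_trans zero_le_one hm) (le_of_lt hd0)
  refine lt_of_le_of_lt (divOutB_le (PySem.Int.floordiv m d) d hq0 hd) ?_
  rw [hfe]
  exact Int.ediv_lt_self_of_pos_of_ne_one (lt_of_lt_of_le zero_lt_one hm)
    (ne_of_gt (lt_of_lt_of_le one_lt_two hd))

theorem divOutB_pos (m d : Int) : 2 ≤ d → 1 ≤ m → 1 ≤ divOutB m d := by
  induction m using divOutB.induct d with
  | case1 m h ih =>
    intro hd hm
    rw [divOutB, dif_pos h]
    have hd0 : (0:Int) < d := lt_of_lt_of_le zero_lt_two hd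
    have hdvd : d ∣ m := (mod_zero_iff m d hd0).mp h.2.1
    have hdm : d ≤ m := Int.le_of_dvd (lt_of_lt_of_le zero_lt_one hm) hdvd
    have hq1 : 1 ≤ PySem.Int.floordiv m d := by
      rw [PySem.Int.floordiv_eq_ediv_of_pos hd0]
      exact (Int.le_ediv_iff_mul_le hd0).mpr (by rwa [one_mul])
    exact ih hd hq1
  | case2 m h =>
    intro _ hm
    rw [divOutB, dif_neg h]
    exact hm

theorem four_le (m d : Int) (h : 2 ≤ d ∧ d * d ≤ m) : 1 ≤ m :=
  le_trans (le_trans (by norm_num)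
    (mul_le_mul h.1 h.1 zero_le_two (le_trans zero_le_two h.1))) h.2

-- _sopf's main loop: state (m, d, s), returns the final (m, s); guard '2 ≤ d' is totality only
def sopfLoop (m d s : Int) : Int × Int :=
  if h : 2 ≤ d ∧ d * d ≤ m then
    if PySem.Int.mod m d = 0 then sopfLoop (divOutB m d) (d + 1) (s + d)
    else sopfLoop m (d + 1) s
  else (m, s)
termination_by (m.toNat, (m - d).toNat)
decreasing_by
  · exact Prod.Lex.left _ _ (dec_toNat m (divOutB m d)
      (divOutB_nonneg m d (le_trans zero_le_one (four_le m d h)) h.1)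
      (divOutB_lt m d h.1 (four_le m d h) (by assumption)))
  · exact Prod.Lex.right _ (sq_step_dec m d h.1 h.2)

def sopf (n : Int) : Int :=
  match sopfLoop n 2 0 with
  | (m, s) => if 1 < m then s + m else s

-- _nth_factor's loop; same shape, carrying r; guard '2 ≤ d' is totality only
def nthLoop (m d r : Int) : Int :=
  if h : 2 ≤ d ∧ d * d ≤ m then
    if PySem.Int.mod m d = 0 then
      if r ≤ d then d else nthLoop (divOutB m d) (d + 1) (r - d)
    else nthLoop m (d + 1) r
  else m
termination_by (m.toNat, (m - d).toNat)
decreasing_by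
  · exact Prod.Lex.left _ _ (dec_toNat m (divOutB m d)
      (divOutB_nonneg m d (le_trans zero_le_one (four_le m d h)) h.1)
      (divOutB_lt m d h.1 (four_le m d h) (by assumption)))
  · exact Prod.Lex.right _ (sq_step_dec m d h.1 h.2)

-- termination facts for B's top loop: a non-prime block has positive length
theorem sopfLoop_snd_ge (m d s : Int) : s ≤ (sopfLoop m d s).2 := by
  induction m, d, s using sopfLoop.induct with
  | case1 m d s h hm ih =>
    rw [sopfLoop, dif_pos h, if_pos hm]
    exact le_trans (le_add_of_nonneg_right (le_trans zero_le_two h.1)) ih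
  | case2 m d s h hm ih =>
    rw [sopfLoop, dif_pos h, if_neg hm]
    exact ih
  | case3 m d s h =>
    rw [sopfLoop, dif_neg h]

theorem sopfLoop_fst_pos (m d s : Int) (hm : 1 ≤ m) : 1 ≤ (sopfLoop m d s).1 := by
  induction m, d, s using sopfLoop.induct with
  | case1 m d s h h0 ih =>
    rw [sopfLoop, dif_pos h, if_pos h0]
    exact ih (divOutB_pos m d h.1 hm)
  | case2 m d s h h0 ih =>
    rw [sopfLoop, dif_pos h, if_neg h0]
    exact ih hm
  | case3 m d s h =>
    rw [sopfLoop, dif_neg h]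
    exact hm

theorem sopfLoop_snd_big (n d s : Int) :
    2 ≤ d → isprimeLoop n d = false → s + 2 ≤ (sopfLoop n d s).2 := by
  induction d using isprimeLoop.induct n with
  | case1 d h h0 =>
    intro _ _
    rw [sopfLoop, dif_pos h, if_pos h0]
    exact le_trans (add_le_add le_rfl h.1) (sopfLoop_snd_ge (divOutB n d) (d + 1) (s + d))
  | case2 d h h0 ih =>
    intro hd hf
    rw [isprimeLoop, dif_pos h, if_neg h0] at hf
    rw [sopfLoop, dif_pos h, if_neg h0]
    exact ih (le_trans hd (le_of_lt (lt_add_one d))) hf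
  | case3 d h =>
    intro _ hf
    rw [isprimeLoop, dif_neg h] at hf
    exact Bool.noConfusion hf

theorem sopf_pos (n : Int) (hf : isprimeB n = false) : 1 ≤ sopf n := by
  have hg : 2 ≤ (2:Int) ∧ 2 * 2 ≤ n := by
    by_contra hc
    rw [isprimeB, isprimeLoop, dif_neg hc] at hf
    exact Bool.noConfusion hf
  have hn1 : 1 ≤ n := le_trans (by norm_num) hg.2
  have h1 := sopfLoop_snd_big n 2 0 le_rfl hf
  have h2 := sopfLoop_fst_pos n 2 0 hn1
  rw [sopf]
  rcases hsp : sopfLoop n 2 0 with ⟨m, s⟩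
  rw [hsp] at h1 h2
  dsimp only at h1 h2 ⊢
  split_ifs with hm
  · exact le_trans (le_trans (by norm_num) h1) (le_add_of_nonneg_right (le_trans zero_le_one h2))
  · exact le_trans (by norm_num) h1

theorem loopAlt_dec (r n : Int)
    (h : ¬ r ≤ (if isprimeB (n + 1) = true then 1 else sopf (n + 1))) :
    (r - (if isprimeB (n + 1) = true then 1 else sopf (n + 1))).toNat < r.toNat := by
  have hln : 1 ≤ (if isprimeB (n + 1) = true then 1 else sopf (n + 1)) := by
    split_ifs with hp
    · exact le_rfl
    · exact sopf_pos (n + 1) (Bool.eq_false_iff.mpr hp)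
  have hlt : (if isprimeB (n + 1) = true then 1 else sopf (n + 1)) < r := not_le.mp h
  exact dec_toNat r _ (sub_nonneg.mpr (le_of_lt hlt))
    (sub_lt_self r (lt_of_lt_of_le zero_lt_one hln))

-- the 'while True' of Source B: per n, block length ln = 1 if prime else sopf n; stop when r ≤ ln
def loopAlt (r n : Int) : Int :=
  let ln := if isprimeB (n + 1) = true then 1 else sopf (n + 1)
  if h : r ≤ ln then
    if isprimeB (n + 1) = true then n + 1 else nthLoop (n + 1) 2 r
  else loopAlt (r - ln) (n + 1)
termination_by r.toNat
decreasing_by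
  · exact loopAlt_dec r n h

def getnr_alt (count : Int) : Int :=
  if count ≤ 0 then 0 else loopAlt count 0

-- ===== PRECONDITION & SPEC =====
def Spec_getnr (count : Int) (out : Int) : Prop := out = getnr_alt count
instance (count : Int) (out : Int) : Decidable (Spec_getnr count out) := by unfold Spec_getnr; infer_instance

-- ===== CLAIM (what is proved, stated in full; the proofs are below) =====
def Claim_equal_getnr : Prop := ∀ (count : Int), Dom_getnr count → Spec_getnr count (getnr count)

-- ===== LEMMAS AND PROOFS =====

theorem divOut_spec (d n p : Int) :
    1 ≤ n → 2 ≤ d →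
    1 ≤ (divOut n d p).1 ∧ (divOut n d p).1 ≤ n ∧ p ≤ (divOut n d p).2 ∧
    ((divOut n d p).2 = p → (divOut n d p).1 = n ∧ PySem.Int.mod n d ≠ 0) ∧
    ((divOut n d p).1 = n → (divOut n d p).2 = p) := by
  induction n, p using divOut.induct d with
  | case1 n p h ih =>
    intro hn1 hd2
    have hm := h.2.1
    have hd0 : (0:Int) < d := by omega
    have hm' := hm
    rw [PySem.Int.mod_eq_emod_of_pos hd0] at hm'
    obtain ⟨k, hk⟩ := Int.dvd_of_emod_eq_zero hm'
    have hk1 : 1 ≤ k := by nlinarith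
    have he : PySem.Int.floordiv n d = k := by
      rw [PySem.Int.floordiv_eq_ediv_of_pos hd0, hk]
      exact Int.mul_ediv_cancel_left k (by omega)
    have hq : 1 ≤ PySem.Int.floordiv n d := by omega
    have hlt : PySem.Int.floordiv n d < n := by rw [he]; nlinarith
    have hspec := ih hq hd2
    rw [divOut, dif_pos h]
    refine ⟨hspec.1, by omega, by omega, fun hp => absurd hp (by omega), fun hq => absurd hq (by omega)⟩
  | case2 n p h =>
    intro hn1 hd2
    rw [divOut, dif_neg h]
    refine ⟨hn1, le_rfl, le_rfl, fun _ => ⟨rfl, fun hm => h ⟨hd2, hm, hn1⟩⟩, fun _ => rfl⟩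

theorem divOutB_eq (m d p : Int) : divOutB m d = (divOut m d p).1 := by
  induction m, p using divOut.induct d with
  | case1 m p h ih => rw [divOutB, dif_pos ⟨h.1, h.2.1, h.2.2⟩, divOut, dif_pos h]; exact ih
  | case2 m p h => rw [divOutB, dif_neg h, divOut, dif_neg h]


-- the common factor walk both sides follow: distinct prime factors in increasing order,
-- with the >sqrt leftover (if any) last
def walk (m d : Int) : List Int :=
  if h : 2 ≤ d ∧ d * d ≤ m then
    if PySem.Int.mod m d = 0 then d :: walk (divOutB m d) (d + 1)
    else walk m (d + 1)
  else if 1 < m then [m] else []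
termination_by (m.toNat, (m - d).toNat)
decreasing_by
  · have hm : 1 ≤ m := by nlinarith [h.1, h.2]
    exact Prod.Lex.left _ _ (by have := divOutB_lt m d h.1 hm (by assumption); omega)
  · have h2 : 2 * d ≤ d * d := by nlinarith [h.1]
    exact Prod.Lex.right _ (by omega)

def blockOf (p : Int) : List Int := (PySem.List.pyRange 0 p 1).map (fun _ => p)

def pick : List Int → Int → Int
  | [], _ => 0
  | p :: ps, r => if r ≤ p then p else pick ps (r - p)

theorem walk_eq_div (m d : Int) (h : 2 ≤ d ∧ d * d ≤ m) (h0 : PySem.Int.mod m d = 0) :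
    walk m d = d :: walk (divOutB m d) (d + 1) := by
  rw [walk, dif_pos h, if_pos h0]

theorem walk_eq_skip (m d : Int) (h : 2 ≤ d ∧ d * d ≤ m) (h0 : ¬ PySem.Int.mod m d = 0) :
    walk m d = walk m (d + 1) := by
  rw [walk, dif_pos h, if_neg h0]

theorem walk_eq_base (m d : Int) (h : ¬ (2 ≤ d ∧ d * d ≤ m)) :
    walk m d = if 1 < m then [m] else [] := by
  rw [walk, dif_neg h]

theorem walk_sum (m d : Int) :
    ∀ s, (if 1 < (sopfLoop m d s).1 then (sopfLoop m d s).2 + (sopfLoop m d s).1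
          else (sopfLoop m d s).2) = s + (walk m d).sum := by
  induction m, d using walk.induct with
  | case1 m d h h0 ih =>
    intro s
    rw [sopfLoop, dif_pos h, if_pos h0, walk_eq_div m d h h0, List.sum_cons, ih (s + d)]
    ring
  | case2 m d h h0 ih =>
    intro s
    rw [sopfLoop, dif_pos h, if_neg h0, walk_eq_skip m d h h0]
    exact ih s
  | case3 m d h h1 =>
    intro s
    rw [sopfLoop, dif_neg h, walk_eq_base m d h]
    split_ifs <;> simp
  | case4 m d h h1 =>
    intro s
    rw [sopfLoop, dif_neg h, walk_eq_base m d h]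
    split_ifs <;> simp

theorem sopf_eq_walk_sum (n : Int) : sopf n = (walk n 2).sum := by
  have h := walk_sum n 2 0
  rw [sopf]
  rcases hs : sopfLoop n 2 0 with ⟨m, s⟩
  rw [hs] at h
  simpa using h

theorem walk_pick (m d : Int) :
    ∀ r, 1 ≤ r → r ≤ (walk m d).sum → nthLoop m d r = pick (walk m d) r := by
  induction m, d using walk.induct with
  | case1 m d h h0 ih =>
    intro r h1 h2
    rw [walk_eq_div m d h h0] at h2 ⊢
    rw [nthLoop, dif_pos h, if_pos h0, pick]
    rw [List.sum_cons] at h2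
    split_ifs with hr
    · rfl
    · exact ih (r - d) (by omega) (by omega)
  | case2 m d h h0 ih =>
    intro r h1 h2
    rw [walk_eq_skip m d h h0] at h2 ⊢
    rw [nthLoop, dif_pos h, if_neg h0]
    exact ih r h1 h2
  | case3 m d h hm =>
    intro r h1 h2
    rw [walk_eq_base m d h, if_pos hm] at h2 ⊢
    rw [nthLoop, dif_neg h, pick, if_pos (by simpa using h2)]
  | case4 m d h hm =>
    intro r h1 h2
    rw [walk_eq_base m d h, if_neg hm] at h2
    simp at h2
    omega

theorem walk_pos (m d : Int) : 2 ≤ d → ∀ p ∈ walk m d, 2 ≤ p := by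
  induction m, d using walk.induct with
  | case1 m d h h0 ih =>
    intro hd p hp
    rw [walk_eq_div m d h h0] at hp
    rcases List.mem_cons.mp hp with h' | h'
    · omega
    · exact ih (by omega) p h'
  | case2 m d h h0 ih =>
    intro hd p hp
    rw [walk_eq_skip m d h h0] at hp
    exact ih (by omega) p hp
  | case3 m d h hm =>
    intro hd p hp
    rw [walk_eq_base m d h, if_pos hm] at hp
    have := List.mem_singleton.mp hp
    omega
  | case4 m d h hm =>
    intro hd p hp
    rw [walk_eq_base m d h, if_neg hm] at hp
    simp at hp

def DInv (n d : Int) : Prop := ∀ i, 2 ≤ i → i < d → ¬ i ∣ n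

theorem walk_one (d : Int) : walk 1 d = [] := by
  rw [walk_eq_base 1 d (by intro hc; nlinarith [hc.1, hc.2]), if_neg (by omega)]

theorem divOut_dvd (d n p : Int) : 1 ≤ n → 2 ≤ d → (divOut n d p).1 ∣ n := by
  induction n, p using divOut.induct d with
  | case1 n p h ih =>
    intro hn hd
    rw [divOut, dif_pos h]
    have hd0 : (0:Int) < d := by omega
    have hm := h.2.1
    rw [PySem.Int.mod_eq_emod_of_pos hd0] at hm
    obtain ⟨k, hk⟩ := Int.dvd_of_emod_eq_zero hm
    have hk1 : 1 ≤ k := by nlinarith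
    have he : PySem.Int.floordiv n d = k := by
      rw [PySem.Int.floordiv_eq_ediv_of_pos hd0, hk]
      exact Int.mul_ediv_cancel_left k (by omega)
    have hrec := ih (by omega : 1 ≤ PySem.Int.floordiv n d) hd
    exact hrec.trans (by rw [he]; exact ⟨d, by rw [hk]; ring⟩)
  | case2 n p h =>
    intro _ _
    rw [divOut, dif_neg h]

theorem divOut_mod (d n p : Int) : 1 ≤ n → 2 ≤ d → PySem.Int.mod (divOut n d p).1 d ≠ 0 := by
  induction n, p using divOut.induct d with
  | case1 n p h ih =>
    intro hn hd
    rw [divOut, dif_pos h]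
    have hd0 : (0:Int) < d := by omega
    have hm := h.2.1
    rw [PySem.Int.mod_eq_emod_of_pos hd0] at hm
    obtain ⟨k, hk⟩ := Int.dvd_of_emod_eq_zero hm
    have hk1 : 1 ≤ k := by nlinarith
    have he : PySem.Int.floordiv n d = k := by
      rw [PySem.Int.floordiv_eq_ediv_of_pos hd0, hk]
      exact Int.mul_ediv_cancel_left k (by omega)
    exact ih (by omega) hd
  | case2 n p h =>
    intro hn hd hm
    rw [divOut, dif_neg h] at hm
    exact h ⟨hd, hm, hn⟩

theorem dinv_top (n d : Int) (hd2 : 2 ≤ d) (hn : 1 < n) (hlt : n < (d + 1) * (d + 1))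
    (hi : DInv n d) (hmd : ¬ d ∣ n) : DInv n n := by
  intro i h2i hilt hidvd
  rcases lt_trichotomy i d with h' | h' | h'
  · exact hi i h2i h' hidvd
  · exact hmd (h' ▸ hidvd)
  · obtain ⟨k, hk⟩ := hidvd
    have hk1 : 1 ≤ k := by nlinarith
    have hkne : k ≠ 1 := by
      intro h1
      rw [h1, mul_one] at hk
      omega
    have hk2 : 2 ≤ k := by omega
    have hkd : k < d + 1 := by nlinarith
    rcases lt_or_eq_of_le (by omega : k ≤ d) with h'' | h''
    · exact hi k hk2 h'' ⟨i, by rw [hk]; ring⟩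
    · exact hmd (h'' ▸ ⟨i, by rw [hk]; ring⟩)

theorem divLoop_walk (n d : Int) (l : List Int) :
    1 ≤ n → (n = 1 ∨ (2 ≤ d ∧ d ≤ n ∧ DInv n d)) →
    divLoop n d l = l ++ (walk n d).flatMap blockOf := by
  induction n, d, l using divLoop.induct with
  | case2 n d l h =>
    intro hn hd
    rw [divLoop, dif_neg h]
    have hn1 : n = 1 := by
      rcases hd with h1 | ⟨h2, h3, _⟩
      · exact h1
      · omega
    subst hn1
    rw [walk_one]
    simp
  | case1 n d l h ih =>
    intro hn hdisj
    have hgt : 1 < n := h.1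
    have hd2 : 2 ≤ d := h.2.1
    have hdn : d ≤ n := h.2.2
    have hInv : DInv n d := by
      rcases hdisj with h1 | ⟨_, _, hi⟩
      · exact absurd h1 (by omega)
      · exact hi
    have hspec := divOut_spec d n 0 (by omega) hd2
    have hdvd : (divOut n d 0).1 ∣ n := divOut_dvd d n 0 (by omega) hd2
    have hmodf : PySem.Int.mod (divOut n d 0).1 d ≠ 0 := divOut_mod d n 0 (by omega) hd2
    have h11 : 1 ≤ (divOut n d 0).1 := hspec.1
    have h1n : (divOut n d 0).1 ≤ n := hspec.2.1
    rw [divLoop, dif_pos h]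
    by_cases hsq : d * d ≤ n
    · by_cases hm0 : PySem.Int.mod n d = 0
      · -- a prime factor d: walk emits d, A appends d copies of d
        have hp0 : (divOut n d 0).2 ≠ 0 := fun hp => (hspec.2.2.2.1 hp).2 hm0
        rw [walk_eq_div n d ⟨hd2, hsq⟩ hm0, divOutB_eq n d 0, List.flatMap_cons]
        by_cases hlt : (d + 1) * (d + 1) > (divOut n d 0).1
        · rw [dif_pos hlt, dif_pos hp0] at ih ⊢
          rcases eq_or_lt_of_le h11 with h1 | h1'
          · rw [ih (by omega) (Or.inl h1.symm), ← h1, walk_one, walk_one]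
            simp [blockOf]
          · have hmd : ¬ d ∣ (divOut n d 0).1 :=
              fun hc => hmodf ((mod_zero_iff _ d (by omega)).mpr hc)
            have hInvN1 : DInv (divOut n d 0).1 d :=
              fun i a b c => hInv i a b (c.trans hdvd)
            have hNN : DInv (divOut n d 0).1 (divOut n d 0).1 :=
              dinv_top _ d hd2 h1' (by omega) hInvN1 hmd
            rw [ih (by omega) (Or.inr ⟨by omega, le_rfl, hNN⟩),
              walk_eq_base ((divOut n d 0).1) ((divOut n d 0).1)
                (by intro hc; nlinarith [hc.1, hc.2]),
              walk_eq_base ((divOut n d 0).1) (d + 1) (by intro hc; omega),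
              if_pos h1']
            simp [blockOf]
        · have hd1n : d + 1 ≤ (divOut n d 0).1 := by nlinarith [not_lt.mp hlt]
          have hInvN1' : DInv (divOut n d 0).1 (d + 1) := by
            intro i h2i hilt hdvd_i
            rcases lt_or_eq_of_le (by omega : i ≤ d) with h' | h'
            · exact hInv i h2i h' (hdvd_i.trans hdvd)
            · exact hmodf ((mod_zero_iff _ d (by omega)).mpr (h' ▸ hdvd_i))
          rw [dif_neg hlt, dif_pos hp0] at ih ⊢
          rw [ih (by omega) (Or.inr ⟨by omega, hd1n, hInvN1'⟩)]
          simp [blockOf]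
      · -- d does not divide n: nothing appended, walk skips d too
        have hdo : divOut n d 0 = (n, 0) := by
          rw [divOut, dif_neg (fun hc => hm0 hc.2.1)]
        rw [walk_eq_skip n d ⟨hd2, hsq⟩ hm0]
        rw [hdo] at ih ⊢
        dsimp only at ih ⊢
        rw [dif_neg (by simp : ¬ (0:Int) ≠ 0)] at ih ⊢
        by_cases hlt : (d + 1) * (d + 1) > n
        · rw [dif_pos hlt] at ih ⊢
          have hmd : ¬ d ∣ n := fun hc => hm0 ((mod_zero_iff n d (by omega)).mpr hc)
          have hNN : DInv n n := dinv_top n d hd2 (by omega) (by omega) hInv hmd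
          rw [ih (by omega) (Or.inr ⟨by omega, le_rfl, hNN⟩),
            walk_eq_base n n (by intro hc; nlinarith [hc.1, hc.2]),
            walk_eq_base n (d + 1) (by intro hc; omega),
            if_pos hgt]
        · have hd1n : d + 1 ≤ n := by nlinarith [not_lt.mp hlt]
          have hInvn' : DInv n (d + 1) := by
            intro i h2i hilt hdvd_i
            rcases lt_or_eq_of_le (by omega : i ≤ d) with h' | h'
            · exact hInv i h2i h' hdvd_i
            · exact hm0 ((mod_zero_iff n d (by omega)).mpr (h' ▸ hdvd_i))
          rw [dif_neg hlt] at ih ⊢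
          rw [ih (by omega) (Or.inr ⟨by omega, hd1n, hInvn'⟩)]
    · -- d*d > n: walk's leftover block; A reaches d = n and divides n out in one go
      rw [walk_eq_base n d (fun hc => hsq hc.2), if_pos hgt]
      rcases eq_or_lt_of_le hdn with hC1 | hC1
      · -- d = n
        subst hC1
        have hmodnn : PySem.Int.mod d d = 0 := by
          rw [PySem.Int.mod_eq_emod_of_pos (by omega)]
          exact Int.emod_self
        have hfl : PySem.Int.floordiv d d = 1 := by
          rw [PySem.Int.floordiv_eq_ediv_of_pos (by omega)]
          exact Int.ediv_self (by omega)
        have hdo2 : divOut 1 d (0 + 1) = (1, 1) := by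
          rw [divOut, dif_neg]
          · norm_num
          · intro hc
            have := hc.2.1
            rw [PySem.Int.mod_eq_emod_of_pos (by omega : (0:Int) < d),
              Int.emod_eq_of_lt (by omega) (by omega)] at this
            omega
        have hdo : divOut d d 0 = (1, 1) := by
          rw [divOut, dif_pos ⟨hd2, hmodnn, by omega⟩, hfl, hdo2]
        rw [hdo] at ih ⊢
        dsimp only at ih ⊢
        rw [dif_pos (by nlinarith : (d + 1) * (d + 1) > (1:Int)),
          dif_pos (by omega : (1:Int) ≠ 0)] at ih ⊢
        rw [ih (by omega) (Or.inl rfl), walk_one]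
        simp [blockOf]
      · -- d < n: d cannot divide n (its cofactor would violate DInv), one idle step to d = n
        have hm0 : PySem.Int.mod n d ≠ 0 := by
          intro hm
          obtain ⟨k, hk⟩ := (mod_zero_iff n d (by omega)).mp hm
          have hk1 : 1 ≤ k := by nlinarith
          have hkne : k ≠ 1 := by
            intro h1
            rw [h1, mul_one] at hk
            omega
          have hkd : k < d := by nlinarith
          exact hInv k (by omega) hkd ⟨d, by rw [hk]; ring⟩
        have hdo : divOut n d 0 = (n, 0) := by
          rw [divOut, dif_neg (fun hc => hm0 hc.2.1)]
        rw [hdo] at ih ⊢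
        dsimp only at ih ⊢
        rw [dif_neg (by simp : ¬ (0:Int) ≠ 0)] at ih ⊢
        rw [dif_pos (by nlinarith : (d + 1) * (d + 1) > n)] at ih ⊢
        have hmd : ¬ d ∣ n := fun hc => hm0 ((mod_zero_iff n d (by omega)).mpr hc)
        have hNN : DInv n n := dinv_top n d hd2 (by omega) (by nlinarith) hInv hmd
        rw [ih (by omega) (Or.inr ⟨by omega, le_rfl, hNN⟩),
          walk_eq_base n n (by intro hc; nlinarith [hc.1, hc.2]), if_pos hgt]

theorem divizori_walk (n : Int) (hn : 1 ≤ n) : divizori n = (walk n 2).flatMap blockOf := by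
  rw [divizori, divLoop_walk n 2 [] hn
    (by rcases eq_or_lt_of_le hn with h | h
        · exact Or.inl h.symm
        · exact Or.inr ⟨le_rfl, by omega, fun i h2 hlt => by omega⟩),
    List.nil_append]

theorem blockOf_replicate (p : Int) : blockOf p = List.replicate p.toNat p := by
  rw [blockOf, PySem.List.pyRange_one]
  simp [List.map_map, Function.comp, List.eq_replicate_iff]

theorem flat_len (ps : List Int) (h : ∀ p ∈ ps, 0 ≤ p) :
    ((ps.flatMap blockOf).length : Int) = ps.sum := by
  induction ps with
  | nil => simp
  | cons p ps ih =>
    have hp : 0 ≤ p := h p (List.mem_cons_self)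
    rw [List.flatMap_cons, List.length_append, blockOf_replicate, List.length_replicate,
      List.sum_cons]
    have := ih (fun q hq => h q (List.mem_cons_of_mem p hq))
    push_cast
    omega

theorem flat_get (ps : List Int) :
    ∀ r, (∀ p ∈ ps, 2 ≤ p) → 1 ≤ r → r ≤ ps.sum →
    PySem.List.pyGet? (ps.flatMap blockOf) (r - 1) = some (pick ps r) := by
  induction ps with
  | nil =>
    intro r _ h1 h2
    simp at h2
    omega
  | cons p ps ih =>
    intro r hall h1 h2
    have hp : 2 ≤ p := hall p (List.mem_cons_self)
    rw [List.sum_cons] at h2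
    rw [List.flatMap_cons]
    rw [PySem.List.pyGet?_of_nonneg _ (by omega : (0:Int) ≤ r - 1)]
    rw [pick]
    have hlen : (blockOf p).length = p.toNat := by
      rw [blockOf_replicate, List.length_replicate]
    split_ifs with hr
    · rw [List.getElem?_append_left (by omega : (r-1).toNat < (blockOf p).length)]
      rw [blockOf_replicate, List.getElem?_replicate, if_pos (by omega)]
    · rw [List.getElem?_append_right (by omega : (blockOf p).length ≤ (r-1).toNat)]
      have hix : (r - 1).toNat - (blockOf p).length = (r - p - 1).toNat := by omega
      rw [hix]
      have := ih (r - p) (fun q hq => hall q (List.mem_cons_of_mem p hq)) (by omega) (by omega)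
      rw [PySem.List.pyGet?_of_nonneg _ (by omega : (0:Int) ≤ r - p - 1)] at this
      exact this

theorem primLoop_iff (l : List Int) (n : Int) :
    primLoop l n = true ↔ ∀ i ∈ l, PySem.Int.mod n i ≠ 0 := by
  induction l with
  | nil => simp [primLoop]
  | cons i rest ih =>
    rw [primLoop]
    split_ifs with h
    · simp only [Bool.false_eq_true, false_iff]
      intro hall
      exact hall i (List.mem_cons_self) h
    · rw [ih]
      constructor
      · intro hall j hj
        rcases List.mem_cons.mp hj with rfl | hj'
        · exact h
        · exact hall j hj'
      · intro hall j hj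
        exact hall j (List.mem_cons_of_mem i hj)

theorem isprimeLoop_iff (n d : Int) (hd : 2 ≤ d) :
    isprimeLoop n d = true ↔ ∀ i, d ≤ i → i * i ≤ n → PySem.Int.mod n i ≠ 0 := by
  induction d using isprimeLoop.induct n with
  | case1 d h h0 =>
    rw [isprimeLoop, dif_pos h, if_pos h0]
    simp only [Bool.false_eq_true, false_iff]
    intro hall
    exact hall d le_rfl h.2 h0
  | case2 d h h0 ih =>
    rw [isprimeLoop, dif_pos h, if_neg h0, ih (by omega)]
    constructor
    · intro hall i hdi hsq
      rcases eq_or_lt_of_le hdi with rfl | h'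
      · exact h0
      · exact hall i (by omega) hsq
    · intro hall i hdi hsq
      exact hall i (by omega) hsq
  | case3 d h =>
    rw [isprimeLoop, dif_neg h]
    simp only [true_iff]
    intro i hdi hsq
    exfalso
    have hdd : ¬ d * d ≤ n := fun hc => h ⟨hd, hc⟩
    nlinarith

theorem prim_eq_isprimeB (n : Int) (hn : 1 ≤ n) : prim n = isprimeB n := by
  have hA : prim n = true ↔
      (∀ i : Int, 2 ≤ i ∧ i < PySem.Int.floordiv n 2 + 1 → PySem.Int.mod n i ≠ 0) := by
    rw [prim, primLoop_iff]
    constructor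
    · intro H i hi
      exact H i (by rw [PySem.List.mem_pyRange_one]; exact hi)
    · intro H i hi
      exact H i (by rwa [PySem.List.mem_pyRange_one] at hi)
  have hB : isprimeB n = true ↔
      (∀ i : Int, 2 ≤ i → i * i ≤ n → PySem.Int.mod n i ≠ 0) := by
    rw [isprimeB, isprimeLoop_iff n 2 le_rfl]
  have hfd : PySem.Int.floordiv n 2 = n / 2 :=
    PySem.Int.floordiv_eq_ediv_of_pos (by omega)
  cases hp : prim n <;> cases hq : isprimeB n
  · rfl
  · -- prim false, isprimeB true: from prim false get a divisor i in [2, n//2]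
    exfalso
    rw [hp] at hA
    rw [hq] at hB
    simp only [Bool.false_eq_true, false_iff, not_forall] at hA
    obtain ⟨i, hi, hmod⟩ := hA
    rw [not_not] at hmod
    obtain ⟨h2i, hile⟩ := hi
    rw [hfd] at hile
    have h2in : 2 * i ≤ n := by omega
    obtain ⟨k, hk⟩ := (mod_zero_iff n i (by omega)).mp hmod
    have hk2 : 2 ≤ k := by nlinarith
    by_cases hii : i * i ≤ n
    · exact hB.mp rfl i h2i hii hmod
    · have hki : k < i := by nlinarith
      have hkk : k * k ≤ n := by nlinarith
      have hkd : PySem.Int.mod n k = 0 :=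
        (mod_zero_iff n k (by omega)).mpr ⟨i, by rw [hk]; ring⟩
      exact hB.mp rfl k hk2 hkk hkd
  · -- prim true, isprimeB false
    exfalso
    rw [hp] at hA
    rw [hq] at hB
    simp only [Bool.false_eq_true, false_iff, not_forall] at hB
    obtain ⟨i, h2i, hii, hmod⟩ := hB
    rw [not_not] at hmod
    have h2in : 2 * i ≤ n := by nlinarith
    apply hA.mp rfl i ⟨h2i, by rw [hfd]; omega⟩ hmod
  · rfl

theorem divizori_len_eq_sopf (n : Int) (hn : 1 ≤ n) :
    (((divizori n).length : Int)) = sopf n := by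
  rw [divizori_walk n hn, flat_len _ (fun p hp => by have := walk_pos n 2 le_rfl p hp; omega),
    sopf_eq_walk_sum]

theorem loopA_eq_loopAlt (k : Nat) :
    ∀ (r n cur : Int) (hn : 0 ≤ n), 1 ≤ r → r.toNat = k → loopA r cur n hn = loopAlt r n := by
  induction k using Nat.strong_induction_on with
  | _ k IH =>
    intro r n cur hn h1 hk
    rw [loopA, dif_pos (by omega : r > 0), loopAlt]
    have hpe : prim (n + 1) = isprimeB (n + 1) := prim_eq_isprimeB (n + 1) (by omega)
    by_cases hp : prim (n + 1) = true
    · rw [dif_pos hp]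
      have hq : isprimeB (n + 1) = true := by rw [← hpe]; exact hp
      simp only [hq, if_true]
      by_cases hr : r ≤ 1
      · rw [dif_pos hr, loopA, dif_neg (by omega : ¬ r - 1 > 0)]
      · rw [dif_neg hr]
        exact IH (r - 1).toNat (by omega) (r - 1) (n + 1) (n + 1) (by omega) (by omega) rfl
    · rw [dif_neg hp]
      have hq : isprimeB (n + 1) = false := Bool.eq_false_iff.mpr (by rw [← hpe]; exact hp)
      have hs1 := sopf_pos (n + 1) hq
      have hlen := divizori_len_eq_sopf (n + 1) (by omega)
      simp only [hq, Bool.false_eq_true, if_false]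
      by_cases hl : ((divizori (n + 1)).length : Int) < r
      · rw [dif_pos ⟨hl, by omega⟩, dif_neg (by omega : ¬ r ≤ sopf (n + 1)), hlen]
        exact IH (r - sopf (n + 1)).toNat (by omega) (r - sopf (n + 1)) (n + 1) cur
          (by omega) (by omega) rfl
      · rw [dif_neg (fun hc => hl hc.1), dif_pos (by omega : r ≤ sopf (n + 1)), loopA,
          dif_neg (by omega : ¬ (-1 : Int) > 0)]
        have hsum : (walk (n + 1) 2).sum = sopf (n + 1) := (sopf_eq_walk_sum (n + 1)).symm
        have hget := flat_get (walk (n + 1) 2) r (walk_pos (n + 1) 2 le_rfl) h1 (by omega)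
        rw [divizori_walk (n + 1) (by omega), hget, Option.getD_some,
          walk_pick (n + 1) 2 r h1 (by omega)]

theorem getnr_spec : Claim_equal_getnr := by
  intro count _
  unfold Spec_getnr getnr getnr_alt
  by_cases h : count ≤ 0
  · rw [if_pos h, loopA, dif_neg (by omega)]
  · rw [if_neg h]
    exact loopA_eq_loopAlt count.toNat count 0 0 le_rfl (by omega) rfl
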